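-- pv_equiv track=rewrite | github.com/jadonnam/polymarket-bot | breaking_news.py | is_breaking
-- ===== SOURCE A (Python) =====
-- BREAKING_TRIGGERS = [
--     # 전쟁/충돌
--     "war declared", "military strike", "troops enter", "missile attack",
--     "nuclear", "ceasefire agreement", "invasion",
--     # 경제 쇼크
--     "emergency rate", "rate cut surprise", "fed emergency",
--     "market crash", "circuit breaker", "trading halted",
--     "bankruptcy", "default",
--     # 트럼프 즉각 반응
--     "trump signs", "trump declares", "trump announces tariff",
--     "executive order",
--     # 코인 급변
--     "bitcoin crashes", "bitcoin surges", "crypto crash",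
--     "etf approved", "etf rejected",
--     # 유가 급변
--     "oil embargo", "opec emergency", "oil supply cut",
--     "strait of hormuz", "oil pipeline",
--     # 기타 시장 쇼크
--     "fed chair", "treasury secretary", "imf warning",
--     "bank run", "silicon valley bank", "lehman",
-- ]
--
-- def is_breaking(title, description=""):
--     text = f"{title} {description}".lower()
--     score = 0
--
--     for kw in BREAKING_TRIGGERS:
--         if kw in text:
--             score += 30
--
--     # 속보 표현
--     if any(w in text for w in ["breaking", "urgent", "just in", "alert", "developing"]):
--         score += 20
--
--     # 고중요도 키워드
--     if any(w in text for w in ["trump", "fed", "bitcoin", "oil", "gold", "war"]):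
--         score += 10
--
--     return score >= 30
-- ===== SOURCE B (Python) =====
-- BREAKING_TRIGGERS = [
--     "war declared", "military strike", "troops enter", "missile attack",
--     "nuclear", "ceasefire agreement", "invasion",
--     "emergency rate", "rate cut surprise", "fed emergency",
--     "market crash", "circuit breaker", "trading halted",
--     "bankruptcy", "default",
--     "trump signs", "trump declares", "trump announces tariff",
--     "executive order",
--     "bitcoin crashes", "bitcoin surges", "crypto crash",
--     "etf approved", "etf rejected",
--     "oil embargo", "opec emergency", "oil supply cut",
--     "strait of hormuz", "oil pipeline",
--     "fed chair", "treasury secretary", "imf warning",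
--     "bank run", "silicon valley bank", "lehman",
-- ]
--
-- BREAKING_WORDS = ["breaking", "urgent", "just in", "alert", "developing"]
-- IMPORTANCE_WORDS = ["trump", "fed", "bitcoin", "oil", "gold", "war"]
--
--
-- def _any_kw(keywords, text):
--     for kw in keywords:
--         if text.find(kw) != -1:
--             return True
--     return False
--
--
-- def is_breaking(title, description=""):
--     text = f"{title} {description}".lower()
--     # No score accumulator: one trigger alone reaches the 30 threshold, and
--     # breaking(20)+importance(10) reach it together; nothing else does.
--     return _any_kw(BREAKING_TRIGGERS, text) or (
--         _any_kw(BREAKING_WORDS, text) and _any_kw(IMPORTANCE_WORDS, text)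
--     )
-- ===== Notes on version B (the rewrite author's own statement) =====
-- stated objective: simpler
-- what changed: Dropped the integer score accumulator and threshold comparison for a direct boolean predicate (trigger present OR (breaking-word AND importance-word), exactly where the 30/20/10 weights reach 30), with keyword membership tested by an explicit recursive scan using str.find instead of the membership operator inside a score fold.
import Mathlib
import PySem

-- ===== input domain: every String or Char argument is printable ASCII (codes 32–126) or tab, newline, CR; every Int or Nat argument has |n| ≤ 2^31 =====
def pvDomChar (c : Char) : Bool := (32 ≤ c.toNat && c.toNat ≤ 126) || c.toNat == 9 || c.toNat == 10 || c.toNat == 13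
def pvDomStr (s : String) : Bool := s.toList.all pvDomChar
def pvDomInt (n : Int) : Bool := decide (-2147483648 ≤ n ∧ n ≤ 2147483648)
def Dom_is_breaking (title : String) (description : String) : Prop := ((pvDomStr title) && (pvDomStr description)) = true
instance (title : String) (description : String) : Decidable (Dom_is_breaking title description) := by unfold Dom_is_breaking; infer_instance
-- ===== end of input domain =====

-- ===== PORT A =====
-- B drops A's score accumulator for a direct boolean predicate, testing keywords by
-- find-based recursion (objective: simpler); same return value.
def pvTriggers : List String := [
  "war declared", "military strike", "troops enter", "missile attack",
  "nuclear", "ceasefire agreement", "invasion",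
  "emergency rate", "rate cut surprise", "fed emergency",
  "market crash", "circuit breaker", "trading halted",
  "bankruptcy", "default",
  "trump signs", "trump declares", "trump announces tariff",
  "executive order",
  "bitcoin crashes", "bitcoin surges", "crypto crash",
  "etf approved", "etf rejected",
  "oil embargo", "opec emergency", "oil supply cut",
  "strait of hormuz", "oil pipeline",
  "fed chair", "treasury secretary", "imf warning",
  "bank run", "silicon valley bank", "lehman"]

def pvBreakingWords : List String := ["breaking", "urgent", "just in", "alert", "developing"]
def pvImportanceWords : List String := ["trump", "fed", "bitcoin", "oil", "gold", "war"]

def is_breaking (title : String) (description : String) : Bool :=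
  let text := PySem.Str.lower (title ++ " " ++ description)
  let score : Int :=
    pvTriggers.foldl (fun s kw => if PySem.Str.isIn kw text then s + 30 else s) 0
  let score := if pvBreakingWords.any (fun w => PySem.Str.isIn w text) then score + 20 else score
  let score := if pvImportanceWords.any (fun w => PySem.Str.isIn w text) then score + 10 else score
  decide (score ≥ 30)

-- ===== PORT B =====
-- Source B's _any_kw: recursion over the keyword list, membership via str.find != -1.
def pvAnyKw : List String → String → Bool
  | [], _ => false
  | kw :: rest, text => decide (PySem.Str.find text kw ≠ -1) || pvAnyKw rest text

def is_breaking_alt (title : String) (description : String) : Bool :=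
  let text := PySem.Str.lower (title ++ " " ++ description)
  pvAnyKw pvTriggers text ||
    (pvAnyKw pvBreakingWords text && pvAnyKw pvImportanceWords text)

-- ===== PRECONDITION & SPEC =====
def Spec_is_breaking (title : String) (description : String) (out : Bool) : Prop := out = is_breaking_alt title description
instance (title : String) (description : String) (out : Bool) : Decidable (Spec_is_breaking title description out) := by unfold Spec_is_breaking; infer_instance

-- ===== CLAIM (what is proved, stated in full; the proofs are below) =====
def Claim_equal_is_breaking : Prop := ∀ (title : String) (description : String), Dom_is_breaking title description → Spec_is_breaking title description (is_breaking title description)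

-- ===== LEMMAS AND PROOFS =====
-- B's find-based membership test agrees with A's substring test.
theorem pv_find_eq_isIn (pat text : String) :
    decide (PySem.Str.find text pat ≠ -1) = PySem.Str.isIn pat text := by
  rw [Bool.eq_iff_iff, decide_eq_true_iff, PySem.Str.find_ne_neg_one_iff,
    PySem.Str.isIn_iff_infix]

-- B's keyword scan agrees with A's List.any over Str.isIn.
theorem pv_anyKw_eq (l : List String) (text : String) :
    pvAnyKw l text = l.any (fun kw => PySem.Str.isIn kw text) := by
  induction l with
  | nil => simp [pvAnyKw]
  | cons kw rest ih => simp only [pvAnyKw, pv_find_eq_isIn, ih, List.any_cons]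

-- A's trigger loop adds 30 per matching trigger: it is 30 * (count of matching keywords).
theorem pv_foldl_score (text : String) (l : List String) (s : Int) :
    l.foldl (fun s kw => if PySem.Str.isIn kw text then s + 30 else s) s
      = s + 30 * (l.countP (fun kw => PySem.Str.isIn kw text)) := by
  induction l generalizing s with
  | nil => simp
  | cons kw t ih =>
    simp only [List.foldl_cons, List.countP_cons, ih]
    split_ifs <;> push_cast <;> ring

-- The score comparison is a boolean combination: trigger present (count > 0) OR (breaking AND importance).
theorem pv_score_bool (a b i : Bool) (c : Nat) (hac : a = true ↔ 0 < c) :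
    (decide ((if i then (if b then (0 : Int) + 30 * c + 20 else (0 : Int) + 30 * c) + 10
                else (if b then (0 : Int) + 30 * c + 20 else (0 : Int) + 30 * c)) ≥ 30))
      = (a || (b && i)) := by
  cases a <;> cases b <;> cases i <;> simp_all <;> omega

-- ===== VERDICT (by name: the statement is the Claim_ definition above) =====
theorem is_breaking_spec : Claim_equal_is_breaking := by
  intro title description _
  unfold Spec_is_breaking is_breaking is_breaking_alt
  simp only [pv_foldl_score, pv_anyKw_eq]
  exact pv_score_bool _ _ _ _ (by rw [List.any_eq_true, List.countP_pos_iff])
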